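-- pv_equiv track=rewrite | github.com/xtudbxk/practice | python/all_neighboring_chars.py | get_substrs
-- ===== SOURCE A (Python) =====
-- import bisect
-- from functools import reduce
--
-- def get_substrs(s):
--     all_substrs = []
--     for substr_len in range(1,len(s)+1):
--         all_substrs.append([])
--         for start_index in range(len(s)+1-substr_len):
--             if len(all_substrs[-1]) <= 0:
--                 all_substrs[-1] = [s[start_index:start_index+substr_len]]
--                 continue
--             insert_index = bisect.bisect_right(all_substrs[-1],s[start_index:start_index+substr_len])
--             if all_substrs[-1][insert_index-1] != s[start_index:start_index+substr_len]:
--                 all_substrs[-1].insert(insert_index,s[start_index:start_index+substr_len])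
--     return reduce(lambda x,y: x+y, all_substrs)
-- ===== SOURCE B (Python) =====
-- def get_substrs(s):
--     subs = set()
--     for i in range(len(s)):
--         for j in range(i + 1, len(s) + 1):
--             subs.add(s[i:j])
--     return sorted(subs, key=lambda x: (len(x), x))
-- ===== Notes on version B (the rewrite author's own statement) =====
-- stated objective: simpler
-- what changed: A builds one list per substring length and keeps each sorted-and-deduplicated by repeated bisect_right + list.insert, then concatenates with reduce; B collects every substring into one global set with a plain double loop and does a single sort with key (len(x), x).
import Mathlib
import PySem

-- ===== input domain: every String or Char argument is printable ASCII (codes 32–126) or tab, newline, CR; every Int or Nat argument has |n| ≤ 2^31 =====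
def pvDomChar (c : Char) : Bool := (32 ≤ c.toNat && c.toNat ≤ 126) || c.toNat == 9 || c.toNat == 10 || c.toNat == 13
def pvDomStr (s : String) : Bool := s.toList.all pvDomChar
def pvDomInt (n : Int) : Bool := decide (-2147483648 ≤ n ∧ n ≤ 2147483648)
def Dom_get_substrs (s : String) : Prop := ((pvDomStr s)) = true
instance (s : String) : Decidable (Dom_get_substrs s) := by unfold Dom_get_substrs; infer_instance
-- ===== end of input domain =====

-- B replaces A's per-length bisect-insertion lists + reduce by one global substring set and a
-- single sort keyed by (length, value); objective: simpler (a timing run also measured B faster).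

-- ===== PORT A =====
-- one pass of A's inner loop: reads all_substrs[-1], bisect-inserts s[i:i+L] unless already present
def get_substrs_inner (s : String) (L : Int) (all : List (List String)) (i : Int) :
    List (List String) :=
  let sub := PySem.Str.slice s (some i) (some (i + L))
  let cur := PySem.List.pyGetD all (-1) []
  if cur.length ≤ 0 then
    PySem.List.pySetD all (-1) [sub]
  else
    let idx := PySem.List.bisectRight cur sub
    if PySem.List.pyGetD cur ((idx : Int) - 1) "" ≠ sub then
      PySem.List.pySetD all (-1) (PySem.List.insert cur (idx : Int) sub)
    else all

def get_substrs (s : String) : List String :=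
  let n := PySem.Str.len s
  let all := (PySem.List.pyRange 1 (n + 1) 1).foldl (fun all L =>
    (PySem.List.pyRange 0 (n + 1 - L) 1).foldl (get_substrs_inner s L) (all ++ [[]])) []
  match all with
  | [] => []  -- Python raises TypeError here (reduce of an empty list); excluded by Pre_
  | g :: gs => gs.foldl (· ++ ·) g

-- ===== PORT B =====
def get_substrs_alt (s : String) : List String :=
  let n := PySem.Str.len s
  let subs : PySem.Set String := (PySem.List.pyRange 0 n 1).foldl (fun subs i =>
    (PySem.List.pyRange (i + 1) (n + 1) 1).foldl (fun subs j =>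
      PySem.Set.add subs (PySem.Str.slice s (some i) (some j))) subs) PySem.Set.empty
  PySem.List.sorted2 subs (fun x => PySem.Str.len x) (fun x => x)

-- ===== PRECONDITION & SPEC =====
-- Pre_ excludes only the empty string, on which A raises TypeError (reduce of an empty list).
def Pre_get_substrs (s : String) : Prop := s ≠ ""
instance (s : String) : Decidable (Pre_get_substrs s) := by unfold Pre_get_substrs; infer_instance
def pvWitness_get_substrs : String := "aba"

def Spec_get_substrs (s : String) (out : List String) : Prop := out = get_substrs_alt s
instance (s : String) (out : List String) : Decidable (Spec_get_substrs s out) := by unfold Spec_get_substrs; infer_instance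

-- ===== CLAIM (what is proved, stated in full; the proofs are below) =====
def Claim_equal_get_substrs : Prop := ∀ (s : String), Dom_get_substrs s → Pre_get_substrs s → Spec_get_substrs s (get_substrs s)

-- ===== LEMMAS AND PROOFS =====

-- the value-level step of A's inner loop (the substring already computed)
def pvStep (cur : List String) (sub : String) : List String :=
  if cur.length ≤ 0 then [sub]
  else
    let idx := PySem.List.bisectRight cur sub
    if PySem.List.pyGetD cur ((idx : Int) - 1) "" ≠ sub then
      PySem.List.insert cur (idx : Int) sub
    else cur

-- the substrings of length L in A's scan order
def pvSubs (s : String) (L : Int) : List String :=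
  (PySem.List.pyRange 0 (PySem.Str.len s + 1 - L) 1).map
    (fun i => PySem.Str.slice s (some i) (some (i + L)))

def pvGroupRes (s : String) (L : Int) : List String := (pvSubs s L).foldl pvStep []

-- all substrings in B's scan order
def pvAll (s : String) : List String :=
  (PySem.List.pyRange 0 (PySem.Str.len s) 1).flatMap (fun i =>
    (PySem.List.pyRange (i + 1) (PySem.Str.len s + 1) 1).map
      (fun j => PySem.Str.slice s (some i) (some j)))

-- the sort key of B, as one lexicographic key
def pvLexKey (x : String) : Lex (Int × String) := toLex (PySem.Str.len x, x)

theorem pvSetD_append (xs : List (List String)) (x v : List String) :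
    PySem.List.pySetD (xs ++ [x]) (-1) v = xs ++ [v] := by
  simp [PySem.List.pySetD, PySem.List.pySet?, PySem.List.pyIdx?]

theorem pvInnerStep (s : String) (L : Int) (front : List (List String)) (last : List String) (i : Int) :
    get_substrs_inner s L (front ++ [last]) i
      = front ++ [pvStep last (PySem.Str.slice s (some i) (some (i + L)))] := by
  simp only [get_substrs_inner, pvStep, PySem.List.pyGetD_neg_one_append_singleton, pvSetD_append]
  split_ifs <;> simp

theorem pvInner_append (s : String) (L : Int) (lst : List Int) :
    ∀ (front : List (List String)) (last : List String),
      lst.foldl (get_substrs_inner s L) (front ++ [last]) =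
        front ++ [lst.foldl (fun cur i => pvStep cur (PySem.Str.slice s (some i) (some (i + L)))) last] := by
  induction lst with
  | nil => intro front last; simp
  | cons a t ih =>
    intro front last
    rw [List.foldl_cons, pvInnerStep, ih, List.foldl_cons]

theorem pvInsert_natCast (xs : List String) (k : Nat) (v : String) (h : k ≤ xs.length) :
    PySem.List.insert xs (k : Int) v = xs.take k ++ v :: xs.drop k := by
  have h1 : (min (k : Int) xs.length) = (k : Int) := by omega
  have h2 : ¬((k : Int) < 0) := by omega
  simp [PySem.List.insert, PySem.List.sliceIndices, h1, h2]

-- bisect_right spec over String (the PySem lemma is stated for Int lists only)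
theorem pvBisectLoop_spec (xs : List String) (x : String)
    (hs : xs.Pairwise (· ≤ ·)) :
    ∀ (fuel lo hi : Nat), lo ≤ hi → hi ≤ xs.length → hi - lo ≤ fuel →
      (∀ (j : Nat) (hj : j < xs.length), j < lo → xs[j] ≤ x) →
      (∀ (j : Nat) (hj : j < xs.length), hi ≤ j → x < xs[j]) →
      lo ≤ PySem.List.bisectRightLoop xs x fuel lo hi ∧
      PySem.List.bisectRightLoop xs x fuel lo hi ≤ hi ∧
      (∀ (j : Nat) (hj : j < xs.length), j < PySem.List.bisectRightLoop xs x fuel lo hi → xs[j] ≤ x) ∧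
      (∀ (j : Nat) (hj : j < xs.length), PySem.List.bisectRightLoop xs x fuel lo hi ≤ j → x < xs[j]) := by
  have hmono : ∀ (i j : Nat) (hi' : i < xs.length) (hj : j < xs.length), i ≤ j → xs[i] ≤ xs[j] := by
    intro i j hi' hj hij
    rcases Nat.eq_or_lt_of_le hij with rfl | hlt
    · exact le_refl _
    · exact List.pairwise_iff_getElem.mp hs i j hi' hj hlt
  intro fuel
  induction fuel with
  | zero =>
    intro lo hi h1 h2 h3 hlow hhigh
    rw [PySem.List.bisectRightLoop.eq_1]
    exact ⟨le_refl _, h1, fun j hj hlt => hlow j hj hlt, fun j hj hle => hhigh j hj (by omega)⟩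
  | succ n ih =>
    intro lo hi h1 h2 h3 hlow hhigh
    rw [PySem.List.bisectRightLoop.eq_2]
    by_cases hlt : lo < hi
    · rw [if_pos hlt]
      have hmid : (lo + hi) / 2 < xs.length := by omega
      rw [List.getElem?_eq_getElem hmid]
      dsimp only
      by_cases hxy : x < xs[(lo + hi) / 2]
      · rw [if_pos hxy]
        exact (ih lo ((lo + hi) / 2) (by omega) (by omega) (by omega) hlow
          (fun j hj hle => lt_of_lt_of_le hxy (hmono _ _ hmid hj hle))).imp id
          (fun h => ⟨by omega, h.2⟩)
      · rw [if_neg hxy]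
        have hy : xs[(lo + hi) / 2] ≤ x := not_lt.mp hxy
        exact (ih ((lo + hi) / 2 + 1) hi (by omega) h2 (by omega)
          (fun j hj hjlt => le_trans (hmono _ _ hj hmid (by omega)) hy) hhigh).imp
          (fun h => by omega) id
    · rw [if_neg hlt]
      exact ⟨le_refl _, h1, fun j hj hjlt => hlow j hj hjlt, fun j hj hle => hhigh j hj (by omega)⟩

theorem pvBisect_spec (xs : List String) (x : String) (hs : xs.Pairwise (· ≤ ·)) :
    PySem.List.bisectRight xs x ≤ xs.length ∧
    (∀ (j : Nat) (hj : j < xs.length), j < PySem.List.bisectRight xs x → xs[j] ≤ x) ∧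
    (∀ (j : Nat) (hj : j < xs.length), PySem.List.bisectRight xs x ≤ j → x < xs[j]) := by
  have h := pvBisectLoop_spec xs x hs xs.length 0 xs.length (by omega) (by omega) (by omega)
    (by omega) (fun j hj hle => by omega)
  exact ⟨h.2.1, h.2.2.1, h.2.2.2⟩

theorem pvMem_drop (xs : List String) (k : Nat) (b : String) (hb : b ∈ xs.drop k) :
    ∃ j, k ≤ j ∧ ∃ h : j < xs.length, xs[j] = b := by
  rw [List.mem_iff_getElem] at hb
  obtain ⟨m, hm, he⟩ := hb
  exact ⟨k + m, by omega, by rw [List.length_drop] at hm; omega, by rw [← he, List.getElem_drop]⟩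

theorem pvMem_take (xs : List String) (k : Nat) (b : String) (hb : b ∈ xs.take k) :
    ∃ j, j < k ∧ ∃ h : j < xs.length, xs[j] = b := by
  rw [List.mem_iff_getElem] at hb
  obtain ⟨m, hm, he⟩ := hb
  rw [List.length_take] at hm
  exact ⟨m, by omega, by omega, by rw [← he, List.getElem_take]⟩

-- one step of A's inner loop keeps the group strictly sorted and adds exactly the new substring
theorem pvStep_spec (cur : List String) (sub : String) (h : cur.Pairwise (· < ·)) :
    (pvStep cur sub).Pairwise (· < ·) ∧
    (∀ x, x ∈ pvStep cur sub ↔ x ∈ cur ∨ x = sub) := by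
  match cur with
  | [] => refine ⟨by simp [pvStep], fun x => by simp [pvStep]⟩
  | c :: t =>
    have hne : (c :: t : List String) ≠ [] := by simp
    set cur := c :: t with hcur
    have hlen : ¬ (cur.length ≤ 0) := by simp [hcur]
    have hmono : ∀ (i j : Nat) (hi' : i < cur.length) (hj : j < cur.length), i ≤ j → cur[i] ≤ cur[j] := by
      intro i j hi' hj hij
      rcases Nat.eq_or_lt_of_le hij with rfl | hlt
      · exact le_refl _
      · exact le_of_lt (List.pairwise_iff_getElem.mp h i j hi' hj hlt)
    obtain ⟨hle, hlo, hhi⟩ := pvBisect_spec cur sub (h.imp le_of_lt)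
    set idx := PySem.List.bisectRight cur sub with hidx
    unfold pvStep
    rw [if_neg hlen]
    simp only [← hidx]
    by_cases hidx0 : idx = 0
    · have hgetlast : PySem.List.pyGetD cur ((idx : Int) - 1) "" = cur.getLast hne := by
        rw [hidx0]; norm_num; exact PySem.List.pyGetD_neg_one cur "" hne
      have hlastlt : sub < cur.getLast hne := by
        rw [List.getLast_eq_getElem]
        exact hhi _ (by omega) (by omega)
      rw [if_pos (by rw [hgetlast]; exact fun hc => absurd hc.symm (ne_of_lt hlastlt))]
      have hins : PySem.List.insert cur ((idx : Int)) sub = sub :: cur := by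
        rw [hidx0]
        have := pvInsert_natCast cur 0 sub (by omega)
        simpa using this
      rw [hins]
      constructor
      · rw [List.pairwise_cons]
        refine ⟨fun b hb => ?_, h⟩
        rw [List.mem_iff_getElem] at hb
        obtain ⟨m, hm, he⟩ := hb
        exact he ▸ hhi m hm (by omega)
      · intro x; simp; tauto
    · have hlen0 : 0 < cur.length := by simp [hcur]
      have hi1 : idx - 1 < cur.length := by omega
      have hcast : ((idx : Int) - 1) = ((idx - 1 : Nat) : Int) := by omega
      have hget : PySem.List.pyGetD cur ((idx : Int) - 1) "" = cur[idx - 1] := by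
        rw [hcast, PySem.List.pyGetD_natCast, List.getD_eq_getElem?_getD,
          List.getElem?_eq_getElem hi1]
        rfl
      by_cases heq : cur[idx - 1] = sub
      · rw [if_neg (by rw [hget]; simpa using heq)]
        refine ⟨h, fun x => ?_⟩
        constructor
        · exact fun hx => Or.inl hx
        · rintro (hx | rfl)
          · exact hx
          · exact heq ▸ List.getElem_mem hi1
      · rw [if_pos (by rw [hget]; simpa using heq)]
        have hlt_sub : cur[idx - 1] < sub := lt_of_le_of_ne (hlo _ hi1 (by omega)) heq
        rw [pvInsert_natCast cur idx sub hle]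
        constructor
        · rw [List.pairwise_append]
          refine ⟨List.Pairwise.sublist (List.take_sublist _ _) h, ?_, ?_⟩
          · rw [List.pairwise_cons]
            refine ⟨fun b hb => ?_, List.Pairwise.sublist (List.drop_sublist _ _) h⟩
            obtain ⟨j, hj1, hj2, hj3⟩ := pvMem_drop cur idx b hb
            exact hj3 ▸ hhi j hj2 hj1
          · intro a ha b hb
            obtain ⟨j, hj1, hj2, hj3⟩ := pvMem_take cur idx a ha
            have haux : a < sub := by
              calc a = cur[j] := hj3.symm
                _ ≤ cur[idx-1] := hmono j (idx-1) hj2 hi1 (by omega)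
                _ < sub := hlt_sub
            rcases List.mem_cons.mp hb with rfl | hb'
            · exact haux
            · obtain ⟨j', hj1', hj2', hj3'⟩ := pvMem_drop cur idx b hb'
              exact lt_trans haux (hj3' ▸ hhi j' hj2' hj1')
        · intro x
          conv_rhs => rw [← List.take_append_drop idx cur]
          simp only [List.mem_append, List.mem_cons]
          tauto

theorem pvLoop_spec (subs : List String) :
    ∀ cur, cur.Pairwise (· < ·) →
      (subs.foldl pvStep cur).Pairwise (· < ·) ∧
      (∀ x, x ∈ subs.foldl pvStep cur ↔ x ∈ cur ∨ x ∈ subs) := by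
  induction subs with
  | nil => intro cur h; exact ⟨h, fun x => by simp⟩
  | cons a t ih =>
    intro cur h
    obtain ⟨h1, h2⟩ := pvStep_spec cur a h
    obtain ⟨h3, h4⟩ := ih (pvStep cur a) h1
    refine ⟨h3, fun x => ?_⟩
    rw [List.foldl_cons] at *
    rw [h4 x]
    simp [h2 x]
    tauto

theorem pvFoldlAppendAcc {α : Type} (gs : List (List α)) :
    ∀ g : List α, gs.foldl (· ++ ·) g = g ++ gs.flatten := by
  induction gs with
  | nil => simp
  | cons a t ih => intro g; simp [ih, List.append_assoc]

-- A computes, length by length, the strictly sorted groups, then concatenates them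
theorem pvA_eq (s : String) (hs : s ≠ "") :
    get_substrs s = ((PySem.List.pyRange 1 (PySem.Str.len s + 1) 1).map (pvGroupRes s)).flatten := by
  have hn : 1 ≤ PySem.Str.len s := by
    have h2 : 0 < s.length := Nat.pos_of_ne_zero (fun hc => hs (String.length_eq_zero_iff.mp hc))
    simp [PySem.Str.len_eq]; omega
  unfold get_substrs
  have hbody : (fun all L =>
      (PySem.List.pyRange 0 (PySem.Str.len s + 1 - L) 1).foldl (get_substrs_inner s L) (all ++ [[]]))
      = fun (all : List (List String)) L => all ++ [pvGroupRes s L] := by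
    funext all L
    rw [pvInner_append]
    unfold pvGroupRes pvSubs
    rw [List.foldl_map]
  simp only [hbody]
  rw [PySem.List.foldl_append_singleton_eq_map (pvGroupRes s)]
  rw [PySem.List.pyRange_one_cons (by omega)]
  simp only [List.map_cons, List.nil_append]
  rw [pvFoldlAppendAcc]
  rw [List.flatten_cons]

theorem pvSetBuild (g : Int → List String) (lst : List Int) :
    ∀ acc : List String,
      lst.foldl (fun a i => PySem.Set.update a (g i)) (PySem.Set.ofList acc)
        = PySem.Set.ofList (acc ++ lst.flatMap g) := by
  induction lst with
  | nil => intro acc; simp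
  | cons a t ih =>
    intro acc
    rw [List.foldl_cons, List.flatMap_cons, ← List.append_assoc]
    rw [show PySem.Set.update (PySem.Set.ofList acc) (g a) = PySem.Set.ofList (acc ++ g a) by
      rw [← PySem.Set.update_nil_left, ← PySem.Set.update_append, PySem.Set.update_nil_left]]
    exact ih (acc ++ g a)

-- B's tuple-key sort is the sort by the single lexicographic key pvLexKey
theorem pvSorted2_eq (xs : List String) :
    PySem.List.sorted2 xs (fun x => PySem.Str.len x) (fun x => x) false
      = PySem.List.sorted xs pvLexKey false := by
  have hbe : (fun a b : String => decide (PySem.Str.len a < PySem.Str.len b)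
        || (!decide (PySem.Str.len b < PySem.Str.len a) && decide (a < b)))
      = fun a b : String => decide (pvLexKey a < pvLexKey b) := by
    funext a b
    rcases Nat.lt_trichotomy a.length b.length with hl | hl | hl
    · have h1 : a.length < b.length := hl
      have h2 : ¬ (b.length < a.length) := by omega
      simp [pvLexKey, Prod.Lex.lt_iff, h1, h2]
    · have h2 : ¬ (b.length < a.length) := by omega
      have h3 : ¬ (a.length < b.length) := by omega
      simp [pvLexKey, Prod.Lex.lt_iff, hl]
    · have h2 : b.length < a.length := hl
      have h3 : ¬ (a.length < b.length) := by omega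
      have h4 : ¬ (a.length = b.length) := by omega
      simp [pvLexKey, Prod.Lex.lt_iff, h2, h3, h4]
  simp only [PySem.List.sorted2, PySem.List.sorted, Bool.false_eq_true, if_false]
  rw [hbe]

theorem pvB_eq (s : String) :
    get_substrs_alt s = PySem.List.sorted (PySem.Set.ofList (pvAll s)) pvLexKey false := by
  unfold get_substrs_alt
  have hinner : (fun (subs : PySem.Set String) (i : Int) =>
      (PySem.List.pyRange (i + 1) (PySem.Str.len s + 1) 1).foldl (fun subs j =>
        PySem.Set.add subs (PySem.Str.slice s (some i) (some j))) subs)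
      = fun (subs : PySem.Set String) (i : Int) => PySem.Set.update subs
          ((PySem.List.pyRange (i + 1) (PySem.Str.len s + 1) 1).map
            (fun j => PySem.Str.slice s (some i) (some j))) := by
    funext subs i
    rw [PySem.Set.update_map_eq_foldl_add]
  simp only [hinner]
  have hb := pvSetBuild (fun i => (PySem.List.pyRange (i + 1) (PySem.Str.len s + 1) 1).map
      (fun j => PySem.Str.slice s (some i) (some j))) (PySem.List.pyRange 0 (PySem.Str.len s) 1) []
  simp only [List.nil_append] at hb
  rw [show (PySem.Set.empty : PySem.Set String) = PySem.Set.ofList [] from rfl, hb]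
  rw [pvSorted2_eq]
  rfl

theorem pvLen_slice (s : String) (i j : Int) (h0 : 0 ≤ i) (hij : i ≤ j)
    (hn : j ≤ (s.length : Int)) :
    PySem.Str.len (PySem.Str.slice s (some i) (some j)) = j - i := by
  have htl : (PySem.Str.slice s (some i) (some j)).toList
      = PySem.List.slice s.toList (some i) (some j) := by
    simp [PySem.Str.slice]
  have hlen : PySem.Str.len (PySem.Str.slice s (some i) (some j))
      = ((PySem.Str.slice s (some i) (some j)).toList.length : Int) := by
    rw [PySem.Str.len_eq, String.length_toList]
  rw [hlen, htl, PySem.List.slice_toNat (xs := s.toList) (a := i) (b := j) h0 (le_trans h0 hij)]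
  simp only [List.length_take, List.length_drop]
  rw [String.length_toList]
  omega

theorem pvMem_all_iff (s : String) (x : String) :
    x ∈ pvAll s ↔ ∃ L, L ∈ PySem.List.pyRange 1 (PySem.Str.len s + 1) 1 ∧ x ∈ pvSubs s L := by
  unfold pvAll pvSubs
  simp only [List.mem_flatMap, List.mem_map, PySem.List.mem_pyRange_one]
  constructor
  · rintro ⟨i, ⟨hi0, hin⟩, j, ⟨hj1, hj2⟩, rfl⟩
    refine ⟨j - i, ⟨by omega, by omega⟩, i, ⟨by omega, by omega⟩, ?_⟩
    congr 2
    omega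
  · rintro ⟨L, ⟨hL1, hL2⟩, i, ⟨hi0, hin⟩, rfl⟩
    exact ⟨i, ⟨by omega, by omega⟩, i + L, ⟨by omega, by omega⟩, rfl⟩

theorem pvMem_subs_len (s : String) (L : Int) (x : String) (hL : 0 ≤ L)
    (hx : x ∈ pvSubs s L) : PySem.Str.len x = L := by
  unfold pvSubs at hx
  simp only [List.mem_map, PySem.List.mem_pyRange_one] at hx
  obtain ⟨i, ⟨hi0, hin⟩, rfl⟩ := hx
  have hlen : PySem.Str.len s = (s.length : Int) := by simp [PySem.Str.len_eq]
  rw [pvLen_slice s i (i + L) hi0 (by omega) (by omega)]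
  omega

theorem pvGroup_pairwise (s : String) (L : Int) :
    (pvGroupRes s L).Pairwise (· < ·) :=
  (pvLoop_spec (pvSubs s L) [] (by simp)).1

theorem pvMem_group_iff (s : String) (L : Int) (x : String) :
    x ∈ pvGroupRes s L ↔ x ∈ pvSubs s L := by
  unfold pvGroupRes
  rw [(pvLoop_spec (pvSubs s L) [] (by simp)).2 x]
  simp

theorem pvMain (s : String) (hs : s ≠ "") : get_substrs s = get_substrs_alt s := by
  rw [pvA_eq s hs, pvB_eq s]
  have hpair : (((PySem.List.pyRange 1 (PySem.Str.len s + 1) 1).map (pvGroupRes s)).flatten).Pairwise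
      (fun a b => pvLexKey a < pvLexKey b) := by
    rw [List.pairwise_flatten]
    constructor
    · intro l hl
      rw [List.mem_map] at hl
      obtain ⟨L, hL, rfl⟩ := hl
      rw [PySem.List.mem_pyRange_one] at hL
      refine (pvGroup_pairwise s L).imp_of_mem ?_
      intro a b ha hb hab
      have hla := pvMem_subs_len s L a (by omega) ((pvMem_group_iff s L a).mp ha)
      have hlb := pvMem_subs_len s L b (by omega) ((pvMem_group_iff s L b).mp hb)
      rw [Prod.Lex.lt_iff]
      right
      constructor
      · show PySem.Str.len a = PySem.Str.len b
        rw [hla, hlb]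
      · exact hab
    · rw [List.pairwise_map]
      refine (PySem.List.pairwise_lt_pyRange_one 1 (PySem.Str.len s + 1)).imp_of_mem ?_
      intro L1 L2 h1 h2 hlt x hx y hy
      rw [PySem.List.mem_pyRange_one] at h1 h2
      have hx' := pvMem_subs_len s L1 x (by omega) ((pvMem_group_iff s L1 x).mp hx)
      have hy' := pvMem_subs_len s L2 y (by omega) ((pvMem_group_iff s L2 y).mp hy)
      rw [Prod.Lex.lt_iff]
      left
      show PySem.Str.len x < PySem.Str.len y
      omega
  have hperm : (((PySem.List.pyRange 1 (PySem.Str.len s + 1) 1).map (pvGroupRes s)).flatten).Perm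
      (PySem.Set.ofList (pvAll s)) := by
    rw [List.perm_ext_iff_of_nodup
      (hpair.imp (fun {a b} hab => by rintro rfl; exact lt_irrefl _ hab))
      (PySem.Set.nodup_ofList _)]
    intro x
    rw [PySem.Set.mem_ofList, pvMem_all_iff]
    simp only [List.mem_flatten, List.mem_map]
    constructor
    · rintro ⟨l, ⟨L, hL, rfl⟩, hx⟩
      exact ⟨L, hL, (pvMem_group_iff s L x).mp hx⟩
    · rintro ⟨L, hL, hx⟩
      exact ⟨pvGroupRes s L, ⟨L, hL, rfl⟩, (pvMem_group_iff s L x).mpr hx⟩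
  exact (PySem.List.sorted_eq_of_perm_of_pairwise_lt _ _ pvLexKey hperm hpair).symm

-- ===== VERDICT (by name: the statement is the Claim_ definition above) =====
theorem get_substrs_spec : Claim_equal_get_substrs := by
  intro s _ hp
  unfold Spec_get_substrs
  exact pvMain s hp
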